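-- pv_equiv track=rewrite | github.com/iastro-pt/sBART | src/SBART/utils/expected_precision_interval.py | generate_all_possible_combinations
-- ===== SOURCE A (Python) =====
-- def generate_all_possible_combinations(
--     available_orders, N_intervals=4, min_interval_size=10
-- ):
--     """Generate all possible combinations of all elements
--
--     Args:
--         available_orders (List[int]): List of indexes that we want to group together
--         N_intervals (int, optional): Number of intervals. Defaults to 4.
--         min_interval_size (int, optional): Minimum number of points in the interval. Defaults to 10.
--
--     Returns:
--         _type_: _description_
--     """
--
--     combinations = []
--     levels = []
--     # The level represents the left-to-right index of the interval
--     # |---0---|---1---|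
--     for lvl in range(N_intervals - 1):
--         # Max index at which a level can end
--         max_index_end = len(available_orders) - min_interval_size * (
--             N_intervals - lvl - 2
--         )
--         levels.append(max_index_end)
--
--     first_interval_end = list(range(min_interval_size, levels[0] + 1))
--
--     combinations = [[(0, i)] for i in first_interval_end]
--     level_index = 1
--     for level in range(N_intervals - 1):
--         new_comb = []
--         for item in combinations:
--             if level == N_intervals - 2:
--                 # Last loop, go from last value up to end of interval
--                 new_comb.append([*item, [item[-1][1], levels[-1]]])
--             else:
--                 for end in range(
--                     item[-1][1] + min_interval_size, levels[level_index], 1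
--                 ):
--                     new_comb.append([*item, [item[-1][1], end]])
--         combinations = new_comb
--         level_index += 1
--     return combinations
-- ===== SOURCE B (Python) =====
-- def generate_all_possible_combinations(
--     available_orders, N_intervals=4, min_interval_size=10
-- ):
--     """Recursive backtracking re-implementation: depth-first extension of a
--     partial partition instead of level-by-level list expansion."""
--     levels = [
--         len(available_orders) - min_interval_size * (N_intervals - lvl - 2)
--         for lvl in range(N_intervals - 1)
--     ]
--     results = []
--
--     def build(partial, level):
--         if level == N_intervals - 2:
--             results.append(partial + [[partial[-1][1], levels[-1]]])
--         else:
--             for end in range(partial[-1][1] + min_interval_size, levels[level + 1]):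
--                 build(partial + [[partial[-1][1], end]], level + 1)
--
--     for i in range(min_interval_size, levels[0] + 1):
--         build([(0, i)], 0)
--     return results
-- ===== Notes on version B (the rewrite author's own statement) =====
-- stated objective: alternative
-- what changed: Replaces A's breadth-first level-by-level rebuilding of the whole combinations list (N-1 passes that each re-materialize every partial partition) with a depth-first recursive backtracking helper build(partial, level) seeded from each possible first interval, emitting complete partitions in the same lexicographic visit order.
import Mathlib
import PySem

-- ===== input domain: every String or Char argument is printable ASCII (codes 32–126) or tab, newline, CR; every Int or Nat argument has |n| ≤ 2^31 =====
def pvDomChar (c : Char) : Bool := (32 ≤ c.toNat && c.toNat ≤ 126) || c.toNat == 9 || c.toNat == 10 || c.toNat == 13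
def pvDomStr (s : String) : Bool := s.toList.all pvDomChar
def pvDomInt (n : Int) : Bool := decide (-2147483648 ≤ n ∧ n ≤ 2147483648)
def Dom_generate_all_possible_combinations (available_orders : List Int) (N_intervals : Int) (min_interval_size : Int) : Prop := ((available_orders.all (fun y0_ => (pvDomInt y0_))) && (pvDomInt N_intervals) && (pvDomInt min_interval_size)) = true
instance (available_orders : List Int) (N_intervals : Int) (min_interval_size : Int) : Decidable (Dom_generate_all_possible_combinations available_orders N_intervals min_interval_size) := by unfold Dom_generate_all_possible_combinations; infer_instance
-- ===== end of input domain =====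

-- B replaces A's breadth-first level-by-level expansion by a depth-first recursive
-- backtracking enumeration of the same interval partitions (same output, same order).
-- Python's tuple (0, i) and its two-element lists both become List Int here.

-- ===== PORT A =====
-- levels[lvl] = len(available_orders) - min_interval_size * (N_intervals - lvl - 2);
-- both Pythons compute this identical list, so it is one shared helper.
def pvLevels (available_orders : List Int) (N m : Int) : List Int :=
  (PySem.List.pyRange 0 (N - 1) 1).map
    (fun lvl => (available_orders.length : Int) - m * (N - lvl - 2))

-- item[-1][1]; the .getD 0 default is unreachable: every partial partition is nonempty
-- with two-element intervals.
def pvLastEnd (item : List (List Int)) : Int :=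
  (((PySem.List.pyGet? item (-1)).bind (fun l => PySem.List.pyGet? l 1)).getD 0)

-- body of A's outer `for level in range(N_intervals - 1)` loop over state
-- (combinations, level_index); the two inner for/append loops are the flatMap.
def pvStepA (levels : List Int) (N m : Int)
    (st : List (List (List Int)) × Int) (level : Int) :
    List (List (List Int)) × Int :=
  (st.1.flatMap (fun item =>
      if level = N - 2 then
        [item ++ [[pvLastEnd item, (PySem.List.pyGet? levels (-1)).getD 0]]]
      else
        (PySem.List.pyRange (pvLastEnd item + m) ((PySem.List.pyGet? levels st.2).getD 0) 1).map
          (fun e => item ++ [[pvLastEnd item, e]])),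
   st.2 + 1)

def generate_all_possible_combinations (available_orders : List Int) (N_intervals : Int) (min_interval_size : Int) : List (List (List Int)) :=
  let levels := pvLevels available_orders N_intervals min_interval_size
  -- levels[0]: Python raises IndexError when levels = [] (N_intervals < 2); excluded by Pre_
  let L0 := (PySem.List.pyGet? levels 0).getD 0
  let first_interval_end := PySem.List.pyRange min_interval_size (L0 + 1) 1
  let combs0 := first_interval_end.map (fun i => [[(0 : Int), i]])
  ((PySem.List.pyRange 0 (N_intervals - 1) 1).foldl
      (pvStepA levels N_intervals min_interval_size) (combs0, 1)).1

-- ===== PORT B =====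
-- Source B's recursive `build(partial, level)`; `fuel` is only a termination measure,
-- instantiated as (N-2-level).toNat so the fuel-exhausted branch is never reached.
def pvBuild (levels : List Int) (N m : Int) :
    Nat → Int → List (List Int) → List (List (List Int))
  | fuel, level, part =>
    if level = N - 2 then
      [part ++ [[pvLastEnd part, (PySem.List.pyGet? levels (-1)).getD 0]]]
    else
      match fuel with
      | 0 => []
      | Nat.succ fuel' =>
        (PySem.List.pyRange (pvLastEnd part + m) ((PySem.List.pyGet? levels (level + 1)).getD 0) 1).flatMap
          (fun e => pvBuild levels N m fuel' (level + 1) (part ++ [[pvLastEnd part, e]]))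

def generate_all_possible_combinations_alt (available_orders : List Int) (N_intervals : Int) (min_interval_size : Int) : List (List (List Int)) :=
  let levels := pvLevels available_orders N_intervals min_interval_size
  let L0 := (PySem.List.pyGet? levels 0).getD 0
  (PySem.List.pyRange min_interval_size (L0 + 1) 1).flatMap
    (fun i => pvBuild levels N_intervals min_interval_size
        (N_intervals - 2).toNat 0 [[(0 : Int), i]])

-- ===== PRECONDITION & SPEC =====
-- Pre_ excludes exactly N_intervals < 2, where A raises IndexError on levels[0].
def Pre_generate_all_possible_combinations (available_orders : List Int) (N_intervals : Int) (min_interval_size : Int) : Prop :=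
  2 ≤ N_intervals
instance (available_orders : List Int) (N_intervals : Int) (min_interval_size : Int) : Decidable (Pre_generate_all_possible_combinations available_orders N_intervals min_interval_size) := by unfold Pre_generate_all_possible_combinations; infer_instance

def pvWitness_generate_all_possible_combinations : List Int × Int × Int := ([0, 1, 2, 3, 4, 5], 3, 2)

def Spec_generate_all_possible_combinations (available_orders : List Int) (N_intervals : Int) (min_interval_size : Int) (out : List (List (List Int))) : Prop := out = generate_all_possible_combinations_alt available_orders N_intervals min_interval_size
instance (available_orders : List Int) (N_intervals : Int) (min_interval_size : Int) (out : List (List (List Int))) : Decidable (Spec_generate_all_possible_combinations available_orders N_intervals min_interval_size out) := by unfold Spec_generate_all_possible_combinations; infer_instance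

-- ===== CLAIM (what is proved, stated in full; the proofs are below) =====
def Claim_equal_generate_all_possible_combinations : Prop := ∀ (available_orders : List Int) (N_intervals : Int) (min_interval_size : Int), Dom_generate_all_possible_combinations available_orders N_intervals min_interval_size → Pre_generate_all_possible_combinations available_orders N_intervals min_interval_size → Spec_generate_all_possible_combinations available_orders N_intervals min_interval_size (generate_all_possible_combinations available_orders N_intervals min_interval_size)

-- ===== LEMMAS AND PROOFS =====

-- A's remaining loop iterations from `lvl` with level_index = lvl+1 compute exactly
-- the flatMap of B's depth-first build over the current partial partitions.
lemma pvLoop_eq (levels : List Int) (N m : Int) :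
    ∀ (fuel : Nat) (lvl : Int), lvl + fuel = N - 2 →
    ∀ (combs : List (List (List Int))),
      ((PySem.List.pyRange lvl (N - 1) 1).foldl (pvStepA levels N m) (combs, lvl + 1)).1
        = combs.flatMap (pvBuild levels N m fuel lvl) := by
  intro fuel
  induction fuel with
  | zero =>
    intro lvl h combs
    have hlvl : lvl = N - 2 := by omega
    subst hlvl
    rw [PySem.List.pyRange_one_cons (by omega), PySem.List.pyRange_one_eq_nil (by omega)]
    simp [pvStepA, pvBuild]
  | succ fuel ih =>
    intro lvl h combs
    have hne : ¬ lvl = N - 2 := by push_cast at h; omega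
    rw [PySem.List.pyRange_one_cons (by push_cast at h; omega)]
    simp only [List.foldl_cons]
    have hstep : pvStepA levels N m (combs, lvl + 1) lvl
        = (combs.flatMap (fun item =>
            (PySem.List.pyRange (pvLastEnd item + m) ((PySem.List.pyGet? levels (lvl + 1)).getD 0) 1).map
              (fun e => item ++ [[pvLastEnd item, e]])), lvl + 1 + 1) := by
      simp only [pvStepA, hne, if_false]
    rw [hstep, ih (lvl + 1) (by push_cast at h; omega), List.flatMap_assoc]
    refine List.flatMap_congr ?_
    intro item _
    rw [List.flatMap_map]
    conv_rhs => rw [pvBuild]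
    simp only [hne, if_false]

-- ===== VERDICT (by name: the statement is the Claim_ definition above) =====
theorem generate_all_possible_combinations_spec : Claim_equal_generate_all_possible_combinations := by
  intro orders N m _ hpre
  unfold Spec_generate_all_possible_combinations
  unfold generate_all_possible_combinations generate_all_possible_combinations_alt
  have h0 : (0 : Int) + ((N - 2).toNat : Int) = N - 2 := by
    have : (0:Int) ≤ N - 2 := by exact sub_nonneg.mpr hpre
    omega
  have := pvLoop_eq (pvLevels orders N m) N m (N - 2).toNat 0 h0
  simp only [zero_add] at this
  rw [this]
  rw [List.flatMap_map]
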